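-- pv_equiv track=rewrite | github.com/billyxs/notes.md | python/learning/python_morsels/2018-12-31_tail/tail.py | tail_2
-- ===== SOURCE A (Python) =====
-- def tail_2(sequence, count):
--     """Return the last n items in a given sequence."""
--     items = []
--     if count <= 0:
--         return []
--     elif count <= 1:
--         index = slice(0, 0)
--     else:
--         index = slice(-(count - 1), None)
--     for item in sequence:
--         items = [*items[index], item]
--     return items
-- ===== SOURCE B (Python) =====
-- def tail_2(sequence, count):
--     """Return the last n items in a given sequence."""
--     if count <= 0:
--         return []
--     return list(sequence)[-count:]
-- ===== Notes on version B (the rewrite author's own statement) =====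
-- stated objective: faster
-- what changed: Replaces the incremental count-sized sliding-window rebuild on each element by materializing the sequence once and taking a single negative-index slice.
import Mathlib
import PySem

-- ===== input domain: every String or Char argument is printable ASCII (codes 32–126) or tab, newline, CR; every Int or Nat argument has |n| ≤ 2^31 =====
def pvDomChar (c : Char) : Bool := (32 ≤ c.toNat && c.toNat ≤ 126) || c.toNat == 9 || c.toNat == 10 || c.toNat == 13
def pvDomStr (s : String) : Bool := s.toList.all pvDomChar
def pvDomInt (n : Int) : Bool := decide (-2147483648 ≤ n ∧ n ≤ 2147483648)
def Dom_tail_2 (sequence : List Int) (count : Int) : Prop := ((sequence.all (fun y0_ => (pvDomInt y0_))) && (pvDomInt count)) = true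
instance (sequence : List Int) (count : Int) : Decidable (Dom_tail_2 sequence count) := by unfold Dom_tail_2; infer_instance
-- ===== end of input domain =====

-- B replaces A's per-element sliding-window rebuild by one negative-index slice of the whole list (simpler).

-- ===== PORT A =====
def tail_2 (sequence : List Int) (count : Int) : List Int :=
  if count ≤ 0 then []
  else
    -- index = slice(0, 0)  or  slice(-(count-1), None)
    let index : Option Int × Option Int :=
      if count ≤ 1 then (some 0, some 0) else (some (-(count - 1)), none)
    -- for item in sequence: items = [*items[index], item]
    sequence.foldl (fun items item => PySem.List.slice items index.1 index.2 ++ [item]) []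

-- ===== PORT B =====
def tail_2_alt (sequence : List Int) (count : Int) : List Int :=
  if count ≤ 0 then []
  else PySem.List.slice sequence (some (-count)) none   -- list(sequence)[-count:]

-- ===== PRECONDITION & SPEC =====
def Spec_tail_2 (sequence : List Int) (count : Int) (out : List Int) : Prop := out = tail_2_alt sequence count
instance (sequence : List Int) (count : Int) (out : List Int) : Decidable (Spec_tail_2 sequence count out) := by unfold Spec_tail_2; infer_instance

-- ===== CLAIM (what is proved, stated in full; the proofs are below) =====
def Claim_equal_tail_2 : Prop := ∀ (sequence : List Int) (count : Int), Dom_tail_2 sequence count → Spec_tail_2 sequence count (tail_2 sequence count)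

-- ===== LEMMAS AND PROOFS =====

-- the last c elements of l
def lastN (c : Nat) (l : List Int) : List Int := l.drop (l.length - c)

theorem lastN_lastN (a b : Nat) (h : a ≤ b) (l : List Int) :
    lastN a (lastN b l) = lastN a l := by
  unfold lastN
  rw [List.drop_drop, List.length_drop]
  congr 1
  omega

theorem lastN_append_singleton (c : Nat) (hc : 1 ≤ c) (p : List Int) (x : Int) :
    lastN c (p ++ [x]) = lastN (c - 1) p ++ [x] := by
  unfold lastN
  rw [List.length_append, List.drop_append_of_le_length (by simp; omega)]
  congr 2
  simp
  omega

theorem slice_zero_zero (l : List Int) :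
    PySem.List.slice l (some 0) (some 0) = [] := by
  have h := PySem.List.slice_natCast l 0 0
  simpa using h

theorem slice_neg_lastN (k : Nat) (hk : 0 < k) (l : List Int) :
    PySem.List.slice l (some (-(k : Int))) none = lastN k l := by
  rw [PySem.List.slice_from_neg_natCast l k hk]; rfl

theorem tail_2_loop (c : Nat) (hc : 1 ≤ c) (idx : Option Int × Option Int)
    (hidx : idx = if (c : Int) ≤ 1 then (some 0, some 0) else (some (-((c : Int) - 1)), none))
    (seq : List Int) : ∀ p : List Int,
    seq.foldl (fun items item => PySem.List.slice items idx.1 idx.2 ++ [item]) (lastN c p)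
      = lastN c (p ++ seq) := by
  induction seq with
  | nil => intro p; simp
  | cons x s ih =>
    intro p
    have hstep : PySem.List.slice (lastN c p) idx.1 idx.2 ++ [x] = lastN c (p ++ [x]) := by
      by_cases h1 : (c : Int) ≤ 1
      · have hc1 : c = 1 := by omega
        subst hc1
        simp only [hidx, if_pos h1]
        rw [slice_zero_zero, lastN_append_singleton 1 (by omega)]
        unfold lastN; simp
      · have hc2 : 2 ≤ c := by omega
        simp only [hidx, if_neg h1]
        have : -((c : Int) - 1) = -(((c - 1 : Nat) : Int)) := by omega
        rw [this, slice_neg_lastN (c - 1) (by omega), lastN_lastN (c - 1) c (by omega),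
          lastN_append_singleton c hc]
    calc List.foldl (fun items item => PySem.List.slice items idx.1 idx.2 ++ [item]) (lastN c p) (x :: s)
        = List.foldl (fun items item => PySem.List.slice items idx.1 idx.2 ++ [item]) (lastN c (p ++ [x])) s := by
          simp only [List.foldl_cons, hstep]
      _ = lastN c ((p ++ [x]) ++ s) := ih (p ++ [x])
      _ = lastN c (p ++ x :: s) := by simp

-- ===== VERDICT (by name: the statement is the Claim_ definition above) =====
theorem tail_2_spec : Claim_equal_tail_2 := by
  intro sequence count _
  unfold Spec_tail_2 tail_2 tail_2_alt
  by_cases h : count ≤ 0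
  · simp [h]
  · simp only [if_neg h]
    set c : Nat := count.toNat with hc
    have hcount : count = (c : Int) := by omega
    have h1 : 1 ≤ c := by omega
    have := tail_2_loop c h1 (if (c : Int) ≤ 1 then (some 0, some 0) else (some (-((c : Int) - 1)), none)) rfl sequence []
    have hnil : lastN c ([] : List Int) = [] := by unfold lastN; simp
    rw [hnil] at this
    rw [hcount, this, List.nil_append, slice_neg_lastN c (by omega)]
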